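-- pv_equiv track=rewrite | github.com/loociano/advent-of-code | aoc2020/src/day16/solution.py | _find_valid_fields
-- ===== SOURCE A (Python) =====
-- from typing import List, Dict, Tuple
--
-- def _find_valid_fields(values: List[int],
--                        rules: Dict[str, Tuple[int, int, int, int]]) \
--     -> List[str]:
--   """
--   Args:
--     values: list if integer values.
--     rules: field names with two valid ranges
--   Returns
--     Field(s) that satisfy all values.
--   """
--   valid_fields = []  # Could be more than one?
--   for field, rule in rules.items():
--     if _are_valid(values, rule):
--       valid_fields.append(field)
--   return valid_fields
--
-- def _are_valid(values: List[int], rule: Tuple[int, int, int, int]) -> bool: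
--   """
--   Args:
--     values: list of integer valeus.
--     rule: field name with two valid ranges
--   Returns:
--     True if all values satisfy the rule.
--   """
--   for value in values:
--     if not _is_valid(value, rule):
--       return False
--   return True
--
-- def _is_valid(value: int, rule: Tuple[int, int, int, int]) -> bool:
--   """
--   Args:
--     value: value to validate against rule
--     rule: four integers representing two inclusive ranges
--   Returns:
--     True if number is included in one of the ranges.
--   """
--   return (rule[0] <= value <= rule[1]) or (rule[2] <= value <= rule[3])
-- ===== SOURCE B (Python) =====
-- from typing import List, Dict, Tuple
--
-- def _find_valid_fields(values: List[int],
--                        rules: Dict[str, Tuple[int, int, int, int]]) \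
--     -> List[str]:
--   """Boolean-mask sieve: a parallel aliveness mask over the rules is ANDed
--   with each value's acceptance vector; fields are selected by the mask."""
--   items = list(rules.items())
--   alive = [True] * len(items)
--   for value in values:
--     alive = [ok and (r[0] <= value <= r[1] or r[2] <= value <= r[3])
--              for ok, (field, r) in zip(alive, items)]
--     if not any(alive):
--       break
--   return [field for ok, (field, _) in zip(alive, items) if ok]
-- ===== Notes on version B (the rewrite author's own statement) =====
-- stated objective: alternative
-- what changed: B replaces A's rule-outer scan (each rule tested against all values with early False) by a value-outer boolean-mask sieve: a parallel aliveness mask over the rules is ANDed with each value's per-rule acceptance vector (stopping once the mask is all-false), and fields are selected by the final mask via zip.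
import Mathlib
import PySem

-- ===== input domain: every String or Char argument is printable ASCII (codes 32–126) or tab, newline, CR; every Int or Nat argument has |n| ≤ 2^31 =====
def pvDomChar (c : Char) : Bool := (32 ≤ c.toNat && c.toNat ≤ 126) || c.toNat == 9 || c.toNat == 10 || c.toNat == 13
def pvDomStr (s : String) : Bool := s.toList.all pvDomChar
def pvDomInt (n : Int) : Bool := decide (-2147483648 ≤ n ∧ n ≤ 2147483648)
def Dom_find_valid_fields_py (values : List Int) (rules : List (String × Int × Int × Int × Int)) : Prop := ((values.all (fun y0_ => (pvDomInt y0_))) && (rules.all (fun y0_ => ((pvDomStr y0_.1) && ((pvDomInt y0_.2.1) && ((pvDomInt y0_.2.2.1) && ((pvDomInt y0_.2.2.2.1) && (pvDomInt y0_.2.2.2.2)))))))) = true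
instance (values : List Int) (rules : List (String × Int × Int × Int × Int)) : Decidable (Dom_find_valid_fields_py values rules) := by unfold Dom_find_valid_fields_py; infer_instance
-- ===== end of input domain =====

-- B replaces A's rule-outer "test every value per rule" scan with a value-outer
-- boolean-mask sieve over the rules; same return value, alternative structure.

-- ===== PORT A =====
-- _is_valid(value, rule)
def pv_is_valid (value : Int) (rule : Int × Int × Int × Int) : Bool :=
  (decide (rule.1 ≤ value) && decide (value ≤ rule.2.1)) ||
  (decide (rule.2.2.1 ≤ value) && decide (value ≤ rule.2.2.2))

-- _are_valid(values, rule): loop with early `return False`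
def pv_are_valid (values : List Int) (rule : Int × Int × Int × Int) : Bool :=
  match values with
  | [] => true
  | v :: vs => if !(pv_is_valid v rule) then false else pv_are_valid vs rule

def find_valid_fields_py (values : List Int) (rules : List (String × Int × Int × Int × Int)) : List String :=
  rules.foldl (fun acc p => if pv_are_valid values p.2 then acc ++ [p.1] else acc) []

-- ===== PORT B =====
-- alive = [ok and (r[0] <= value <= r[1] or r[2] <= value <= r[3]) for ok, (field, r) in zip(alive, items)]
def pvB_step (value : Int) (alive : List Bool) (items : List (String × Int × Int × Int × Int)) : List Bool :=
  (alive.zip items).map (fun q => q.1 &&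
    ((decide (q.2.2.1 ≤ value) && decide (value ≤ q.2.2.2.1)) ||
     (decide (q.2.2.2.2.1 ≤ value) && decide (value ≤ q.2.2.2.2.2))))

-- for value in values: alive = [...]; if not any(alive): break
def pvB_loop (values : List Int) (alive : List Bool) (items : List (String × Int × Int × Int × Int)) : List Bool :=
  match values with
  | [] => alive
  | v :: vs =>
    let al := pvB_step v alive items
    if !(al.any (fun ok => ok)) then al else pvB_loop vs al items

def find_valid_fields_py_alt (values : List Int) (rules : List (String × Int × Int × Int × Int)) : List String :=
  let alive := pvB_loop values (List.replicate rules.length true) rules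
  ((alive.zip rules).filter (fun q => q.1)).map (fun q => q.2.1)

-- ===== PRECONDITION & SPEC =====
def Spec_find_valid_fields_py (values : List Int) (rules : List (String × Int × Int × Int × Int)) (out : List String) : Prop := out = find_valid_fields_py_alt values rules
instance (values : List Int) (rules : List (String × Int × Int × Int × Int)) (out : List String) : Decidable (Spec_find_valid_fields_py values rules out) := by unfold Spec_find_valid_fields_py; infer_instance

-- ===== CLAIM (what is proved, stated in full; the proofs are below) =====
def Claim_equal_find_valid_fields_py : Prop := ∀ (values : List Int) (rules : List (String × Int × Int × Int × Int)), Dom_find_valid_fields_py values rules → Spec_find_valid_fields_py values rules (find_valid_fields_py values rules)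

-- ===== LEMMAS AND PROOFS =====

theorem pv_are_valid_cons (v : Int) (vs : List Int) (r : Int × Int × Int × Int) :
    pv_are_valid (v :: vs) r = (pv_is_valid v r && pv_are_valid vs r) := by
  cases h : pv_is_valid v r <;> simp [pv_are_valid, h]

-- zipping a pointwise image of `items` with `items` is a map over `items`
theorem zip_map_self {α β : Type} (g : α → β) (items : List α) :
    (items.map g).zip items = items.map (fun p => (g p, p)) := by
  induction items with
  | nil => rfl
  | cons a l ih => simp [ih]

theorem pvB_step_map (v : Int) (g : (String × Int × Int × Int × Int) → Bool)
    (items : List (String × Int × Int × Int × Int)) :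
    pvB_step v (items.map g) items = items.map (fun p => g p && pv_is_valid v p.2) := by
  simp only [pvB_step, zip_map_self, List.map_map]
  apply List.map_congr_left
  intro p _
  rfl

-- invariant: the loop (with its all-false early exit) produces the pointwise conjunction of all tests
theorem pvB_loop_map (values : List Int) (items : List (String × Int × Int × Int × Int))
    (g : (String × Int × Int × Int × Int) → Bool) :
    pvB_loop values (items.map g) items
      = items.map (fun p => g p && pv_are_valid values p.2) := by
  induction values generalizing g with
  | nil => simp [pvB_loop, pv_are_valid]
  | cons v vs ih =>
    simp only [pvB_loop, pvB_step_map]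
    split
    · next h =>
      -- the mask is all-false: every later test is absorbed
      rw [Bool.not_eq_true', List.any_eq_false] at h
      apply List.map_congr_left
      intro p hp
      have hfalse : (g p && pv_is_valid v p.2) = false := by
        simpa using h _ (List.mem_map_of_mem hp)
      rw [pv_are_valid_cons, ← Bool.and_assoc, hfalse, Bool.false_and]
    · rw [ih]
      apply List.map_congr_left
      intro p _
      rw [pv_are_valid_cons, Bool.and_assoc]

theorem find_valid_fields_py_spec : Claim_equal_find_valid_fields_py := by
  intro values rules _
  unfold Spec_find_valid_fields_py find_valid_fields_py find_valid_fields_py_alt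
  rw [PySem.List.foldl_append_if (p := fun p => pv_are_valid values p.2) (f := Prod.fst)]
  have hrep : List.replicate rules.length true
      = rules.map (fun _ => true) := by simp
  rw [hrep]
  show List.map Prod.fst _ = List.map (fun q => q.2.1)
      (List.filter (fun q => q.1) ((pvB_loop values (rules.map fun _ => true) rules).zip rules))
  rw [pvB_loop_map]
  simp only [zip_map_self, List.filter_map, List.map_map]
  simp [Function.comp_def]
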